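-- pv_equiv track=rewrite | github.com/chenzhihan2020/bert | convert_triviaqa_to_squad_format/my_convert_to_squad_format.py | throw_irrelevant_paragraphs
-- ===== SOURCE A (Python) =====
-- def get_num_words(para):
--     words=para.split(' ')
--     return(len(words)+1)
--
-- def throw_irrelevant_paragraphs(text,answer_list,span_length):
--     def find_answer(para,answer_list):
--         doc=para.lower()
--         for answer_string_in_doc in answer_list:
--             index = doc.find(answer_string_in_doc.lower())
--             if(index!=-1):
--                 return True
--         return False
--
--     result=[]
--     paras = text.split('\n')
--     i=0
--     while(i<len(paras)):
--         if find_answer(paras[i],answer_list):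
--             total_num=get_num_words(paras[i])
--             result.append(paras[i])
--             i+=1
--             while(i<len(paras) and total_num<span_length):
--                 result.append(paras[i])
--                 total_num+=get_num_words(paras[i])
--                 i+=1
--         else:
--             i+=1
--     return ' \n '.join(result).strip()
-- ===== SOURCE B (Python) =====
-- def get_num_words(para):
--     words = para.split(' ')
--     return len(words) + 1
--
-- def throw_irrelevant_paragraphs(text, answer_list, span_length):
--     result = []
--     total = span_length  # start outside any collection window
--     for para in text.split('\n'):
--         if total < span_length:
--             # still inside the post-match window: keep the paragraph
--             result.append(para)
--             total += get_num_words(para)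
--         else:
--             doc = para.lower()
--             if any(doc.find(a.lower()) != -1 for a in answer_list):
--                 # paragraph contains an answer: keep it and open a new window
--                 result.append(para)
--                 total = get_num_words(para)
--     return ' \n '.join(result).strip()
-- ===== Notes on version B (the rewrite author's own statement) =====
-- stated objective: simpler
-- what changed: Replaces the index-driven nested while loops with a single flat for-loop over the paragraphs governed by one running word-budget state variable (initialized to span_length so the scan starts outside a window), folding the inner window-filling loop into a branch of the same loop.
import Mathlib
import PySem

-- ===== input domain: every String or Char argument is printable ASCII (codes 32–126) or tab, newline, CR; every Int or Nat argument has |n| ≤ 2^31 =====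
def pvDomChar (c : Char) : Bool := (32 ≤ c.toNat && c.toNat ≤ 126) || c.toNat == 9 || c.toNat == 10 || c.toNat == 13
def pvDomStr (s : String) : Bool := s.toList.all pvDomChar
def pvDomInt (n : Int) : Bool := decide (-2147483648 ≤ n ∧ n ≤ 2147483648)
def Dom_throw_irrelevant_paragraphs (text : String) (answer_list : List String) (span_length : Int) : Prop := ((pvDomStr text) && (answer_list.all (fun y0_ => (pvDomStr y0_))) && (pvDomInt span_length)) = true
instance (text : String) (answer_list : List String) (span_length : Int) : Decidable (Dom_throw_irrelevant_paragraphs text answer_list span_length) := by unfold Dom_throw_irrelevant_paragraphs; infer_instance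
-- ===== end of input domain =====

-- B replaces A's nested while loops by one flat loop over the paragraphs with a running word-budget state (simpler decomposition, same cost).


-- ===== PORT A =====
-- get_num_words(para): len(para.split(' ')) + 1  (identical helper in both Pythons).
-- split? with the literal nonempty separator " " always returns `some`, so `.getD []` is exact.
def pvGetNumWords (para : String) : Int :=
  ((PySem.Str.split? para " ").getD []).length + 1

-- A's find_answer: loop over answer_list with early return on doc.find(answer.lower()) != -1
def pvFindLoop (doc : String) : List String → Bool
  | [] => false
  | a :: rest =>
      if PySem.Str.find doc (PySem.Str.lower a) ≠ -1 then true else pvFindLoop doc rest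

def pvFindAnswer (para : String) (answer_list : List String) : Bool :=
  pvFindLoop (PySem.Str.lower para) answer_list

-- A's inner while loop: consumes paragraphs while total_num < span_length;
-- returns (paragraphs appended, remaining paragraphs).
def pvInnerA (span : Int) : List String → Int → List String × List String
  | [], _ => ([], [])
  | p :: rest, total =>
      if total < span then
        let r := pvInnerA span rest (total + pvGetNumWords p)
        (p :: r.1, r.2)
      else ([], p :: rest)

theorem pvInnerA_len (span : Int) (paras : List String) (total : Int) :
    (pvInnerA span paras total).2.length ≤ paras.length := by
  induction paras generalizing total with
  | nil => simp [pvInnerA]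
  | cons p rest ih =>
      simp only [pvInnerA]
      split
      · exact le_trans (ih _) (Nat.le_succ _)
      · simp

-- A's outer while loop over the paragraph list.
def pvOuterA (answer_list : List String) (span : Int) : List String → List String
  | [] => []
  | p :: rest =>
      if pvFindAnswer p answer_list then
        let pr := pvInnerA span rest (pvGetNumWords p)
        p :: (pr.1 ++ pvOuterA answer_list span pr.2)
      else pvOuterA answer_list span rest
termination_by paras => paras.length
decreasing_by
  · exact Nat.lt_succ_of_le (pvInnerA_len _ _ _)
  · simp

def throw_irrelevant_paragraphs (text : String) (answer_list : List String) (span_length : Int) : String :=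
  PySem.Str.strip (PySem.Str.join " \n "
    (pvOuterA answer_list span_length (((PySem.Str.split? text "\n").getD []))))

-- ===== PORT B =====
-- B's single flat loop: state = running word budget `total` (starts at span_length).
def pvLoopB (answer_list : List String) (span : Int) : List String → Int → List String
  | [], _ => []
  | p :: rest, total =>
      if total < span then
        p :: pvLoopB answer_list span rest (total + pvGetNumWords p)
      else
        let doc := PySem.Str.lower p
        if answer_list.any (fun a => PySem.Str.find doc (PySem.Str.lower a) ≠ -1) then
          p :: pvLoopB answer_list span rest (pvGetNumWords p)
        else
          pvLoopB answer_list span rest total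

def throw_irrelevant_paragraphs_alt (text : String) (answer_list : List String) (span_length : Int) : String :=
  PySem.Str.strip (PySem.Str.join " \n "
    (pvLoopB answer_list span_length (((PySem.Str.split? text "\n").getD [])) span_length))

-- ===== PRECONDITION & SPEC =====
def Spec_throw_irrelevant_paragraphs (text : String) (answer_list : List String) (span_length : Int) (out : String) : Prop := out = throw_irrelevant_paragraphs_alt text answer_list span_length
instance (text : String) (answer_list : List String) (span_length : Int) (out : String) : Decidable (Spec_throw_irrelevant_paragraphs text answer_list span_length out) := by unfold Spec_throw_irrelevant_paragraphs; infer_instance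

-- ===== CLAIM (what is proved, stated in full; the proofs are below) =====
def Claim_equal_throw_irrelevant_paragraphs : Prop := ∀ (text : String) (answer_list : List String) (span_length : Int), Dom_throw_irrelevant_paragraphs text answer_list span_length → Spec_throw_irrelevant_paragraphs text answer_list span_length (throw_irrelevant_paragraphs text answer_list span_length)

-- ===== LEMMAS AND PROOFS =====

-- A's early-return loop find_answer is B's `any`.
theorem pvFindAnswer_eq_any (p : String) (al : List String) :
    pvFindAnswer p al
      = al.any (fun a => PySem.Str.find (PySem.Str.lower p) (PySem.Str.lower a) ≠ -1) := by
  unfold pvFindAnswer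
  induction al with
  | nil => simp [pvFindLoop]
  | cons a rest ih =>
      simp only [pvFindLoop, List.any_cons, ih]
      split <;> simp_all

-- Joint loop correspondence, by strong induction on the paragraph list length:
-- (i)  outside a window (¬ total < span) B's loop behaves like A's outer loop;
-- (ii) in general B's loop emits A's inner-loop output and then continues as A's outer loop.
theorem pvLoop_corr (al : List String) (span : Int) :
    ∀ n (paras : List String), paras.length ≤ n →
      (∀ total, ¬ total < span → pvLoopB al span paras total = pvOuterA al span paras) ∧
      (∀ total, pvLoopB al span paras total
          = (pvInnerA span paras total).1 ++ pvOuterA al span (pvInnerA span paras total).2) := by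
  intro n
  induction n with
  | zero =>
      intro paras h
      have : paras = [] := List.eq_nil_of_length_eq_zero (Nat.le_zero.mp h)
      subst this
      constructor <;> intro total <;> simp [pvLoopB, pvOuterA, pvInnerA]
  | succ n ih =>
      intro paras h
      match paras with
      | [] => constructor <;> intro total <;> simp [pvLoopB, pvOuterA, pvInnerA]
      | p :: rest =>
        have hr : rest.length ≤ n := Nat.lt_succ_iff.mp h
        have hi : ∀ total, ¬ total < span →
            pvLoopB al span (p :: rest) total = pvOuterA al span (p :: rest) := by
          intro total hts
          simp only [pvLoopB, if_neg hts, pvOuterA, pvFindAnswer_eq_any]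
          split
          · rw [(ih rest hr).2 (pvGetNumWords p)]
          · exact (ih rest hr).1 total hts
        refine ⟨hi, ?_⟩
        intro total
        by_cases hts : total < span
        · simp only [pvLoopB, if_pos hts, pvInnerA]
          rw [(ih rest hr).2 (total + pvGetNumWords p)]
          simp
        · have h1 : pvInnerA span (p :: rest) total = ([], p :: rest) := by
            simp [pvInnerA, hts]
          rw [h1]
          simpa using hi total hts

theorem pvLoopB_eq_outer (al : List String) (span : Int) (paras : List String) :
    pvLoopB al span paras span = pvOuterA al span paras :=
  (pvLoop_corr al span paras.length paras (le_refl _)).1 span (lt_irrefl span)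

-- ===== VERDICT (by name: the statement is the Claim_ definition above) =====
theorem throw_irrelevant_paragraphs_spec : Claim_equal_throw_irrelevant_paragraphs := by
  intro text al span _
  unfold Spec_throw_irrelevant_paragraphs throw_irrelevant_paragraphs throw_irrelevant_paragraphs_alt
  rw [pvLoopB_eq_outer]
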